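-- pv_equiv track=rewrite | github.com/charitha22/XSTRESSOR | src/model.py | mergeRangeSeq
-- ===== SOURCE A (Python) =====
-- def mergeRangeSeq(left_seq, right_seq, L):
--
--     result = []
--
--     for i in range(0, len(right_seq)):
--
--         for j in range(0, abs(right_seq[i]-left_seq[i])+1):
--             if(left_seq[i] <= right_seq[i]):
--                 result.append(left_seq[i]+j)
--             else:
--                 result.append(left_seq[i]-j)
--
--             if(len(result) == L):
--                 return result
--
--     return result
-- ===== SOURCE B (Python) =====
-- def mergeRangeSeq(left_seq, right_seq, L):
--     result = []
--     for i in range(len(right_seq)):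
--         l = left_seq[i]
--         r = right_seq[i]
--         seg = range(l, r + 1) if l <= r else range(l, r - 1, -1)
--         if L > 0 and len(result) + len(seg) >= L:
--             result.extend(seg[:L - len(result)])
--             return result
--         result.extend(seg)
--     return result
-- ===== Notes on version B (the rewrite author's own statement) =====
-- stated objective: simpler
-- what changed: A's nested loops append one element at a time and early-return on an exact length-L check; B builds each index's whole arithmetic segment as a range object, truncates it with a slice seg[:L-len(result)] when the cutoff L falls inside it, and extends the result segment-wise.
import Mathlib
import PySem

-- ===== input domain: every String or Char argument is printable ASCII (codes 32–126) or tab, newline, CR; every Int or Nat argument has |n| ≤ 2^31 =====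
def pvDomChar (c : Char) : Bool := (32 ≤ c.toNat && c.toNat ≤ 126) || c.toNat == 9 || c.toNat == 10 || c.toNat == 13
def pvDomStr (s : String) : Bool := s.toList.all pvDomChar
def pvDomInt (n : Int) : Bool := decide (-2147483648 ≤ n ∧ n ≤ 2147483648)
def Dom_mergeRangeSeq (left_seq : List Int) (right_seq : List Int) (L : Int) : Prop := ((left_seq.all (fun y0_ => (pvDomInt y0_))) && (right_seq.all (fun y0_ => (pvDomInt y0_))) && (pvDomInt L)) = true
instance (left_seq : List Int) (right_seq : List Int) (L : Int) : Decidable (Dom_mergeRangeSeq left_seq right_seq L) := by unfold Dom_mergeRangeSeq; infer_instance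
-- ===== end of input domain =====

-- B replaces A's element-at-a-time double loop (with exact-length early return) by a
-- segment-wise pass that extends by whole arithmetic ranges and truncates with a prefix cut
-- (objective: simpler).

-- ===== PORT A =====
-- inner 'for j in range(0, abs(r-l)+1)' loop with its early return, fuel = remaining j steps;
-- returns (result, returned-early?)
def mergeRangeSeqInner (l r L : Int) : List Int → Nat → Nat → List Int × Bool
  | acc, _, 0 => (acc, false)
  | acc, j, fuel+1 =>
    let acc' := acc ++ [if l ≤ r then l + (j : Int) else l - (j : Int)]
    if (acc'.length : Int) = L then (acc', true)
    else mergeRangeSeqInner l r L acc' (j+1) fuel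

-- outer 'for i in range(0, len(right_seq))' loop; left_seq[i] via pyGetD (an out-of-range i
-- is an IndexError in Python and is excluded by Pre_)
def mergeRangeSeqOuter (left_seq right_seq : List Int) (L : Int) : Nat → List Int → List Int
  | i, acc =>
    if h : i < right_seq.length then
      let r := right_seq[i]
      let l := PySem.List.pyGetD left_seq (i : Int) 0
      match mergeRangeSeqInner l r L acc 0 ((r - l).natAbs + 1) with
      | (acc', true) => acc'
      | (acc', false) => mergeRangeSeqOuter left_seq right_seq L (i+1) acc'
    else acc
  termination_by i => right_seq.length - i

def mergeRangeSeq (left_seq : List Int) (right_seq : List Int) (L : Int) : List Int :=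
  mergeRangeSeqOuter left_seq right_seq L 0 []

-- ===== PORT B =====
-- the full segment for one index: range(l, r+1) upward, range(l, r-1, -1) downward
def mergeRangeSeqSeg (l r : Int) : List Int :=
  if l ≤ r then PySem.List.pyRange l (r+1) 1 else PySem.List.pyRange l (r-1) (-1)

def mergeRangeSeqAltGo (left_seq right_seq : List Int) (L : Int) : Nat → List Int → List Int
  | i, acc =>
    if h : i < right_seq.length then
      let seg := mergeRangeSeqSeg (PySem.List.pyGetD left_seq (i : Int) 0) right_seq[i]
      -- seg[:L - len(result)] with 0 < L - len(result) is that prefix of seg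
      if 0 < L ∧ L ≤ ((acc.length + seg.length : Nat) : Int) then
        acc ++ seg.take (L - (acc.length : Int)).toNat
      else mergeRangeSeqAltGo left_seq right_seq L (i+1) (acc ++ seg)
    else acc
  termination_by i => right_seq.length - i

def mergeRangeSeq_alt (left_seq : List Int) (right_seq : List Int) (L : Int) : List Int :=
  mergeRangeSeqAltGo left_seq right_seq L 0 []

-- ===== PRECONDITION & SPEC =====
-- Pre_ excludes exactly the inputs on which A raises IndexError: right_seq longer than
-- left_seq and the early length-L return is not reached within the first left_seq.length
-- segments.  B raises there too.
def Pre_mergeRangeSeq (left_seq : List Int) (right_seq : List Int) (L : Int) : Prop :=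
  right_seq.length ≤ left_seq.length ∨
    (0 < L ∧ L ≤ ((left_seq.zip right_seq).map (fun p => ((p.2 - p.1).natAbs : Int) + 1)).sum)
instance (left_seq : List Int) (right_seq : List Int) (L : Int) : Decidable (Pre_mergeRangeSeq left_seq right_seq L) := by unfold Pre_mergeRangeSeq; infer_instance

def pvWitness_mergeRangeSeq : List Int × List Int × Int := ([3, 7], [5, 4], 4)

def Spec_mergeRangeSeq (left_seq : List Int) (right_seq : List Int) (L : Int) (out : List Int) : Prop := out = mergeRangeSeq_alt left_seq right_seq L
instance (left_seq : List Int) (right_seq : List Int) (L : Int) (out : List Int) : Decidable (Spec_mergeRangeSeq left_seq right_seq L out) := by unfold Spec_mergeRangeSeq; infer_instance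

-- ===== CLAIM (what is proved, stated in full; the proofs are below) =====
def Claim_equal_mergeRangeSeq : Prop := ∀ (left_seq : List Int) (right_seq : List Int) (L : Int), Dom_mergeRangeSeq left_seq right_seq L → Pre_mergeRangeSeq left_seq right_seq L → Spec_mergeRangeSeq left_seq right_seq L (mergeRangeSeq left_seq right_seq L)

-- ===== LEMMAS AND PROOFS =====

-- the elements A appends for j = j0, j0+1, …, j0+fuel-1
def mergeRangeSeqBody (l r : Int) (j0 fuel : Nat) : List Int :=
  (List.range fuel).map (fun k => if l ≤ r then l + ((j0 + k : Nat) : Int) else l - ((j0 + k : Nat) : Int))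

theorem mergeRangeSeqBody_length (l r : Int) (j0 fuel : Nat) :
    (mergeRangeSeqBody l r j0 fuel).length = fuel := by
  simp [mergeRangeSeqBody]

theorem mergeRangeSeqBody_succ (l r : Int) (j0 fuel : Nat) :
    mergeRangeSeqBody l r j0 (fuel+1) =
      (if l ≤ r then l + (j0 : Int) else l - (j0 : Int)) :: mergeRangeSeqBody l r (j0+1) fuel := by
  simp only [mergeRangeSeqBody, List.range_succ_eq_map, List.map_cons, List.map_map]
  refine congrArg₂ List.cons ?_ ?_
  · simp
  · apply List.map_congr_left
    intro k _
    have h1 : j0 + 1 + k = j0 + (k + 1) := by omega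
    simp [Function.comp, h1]

theorem mergeRangeSeqSeg_eq_body (l r : Int) :
    mergeRangeSeqSeg l r = mergeRangeSeqBody l r 0 ((r - l).natAbs + 1) := by
  unfold mergeRangeSeqSeg mergeRangeSeqBody
  split_ifs with h
  · rw [PySem.List.pyRange_one]
    have h1 : (r + 1 - l).toNat = (r - l).natAbs + 1 := by omega
    rw [h1]
    apply List.map_congr_left
    intro k _
    simp
  · rw [PySem.List.pyRange_neg_one]
    have h1 : (l - (r - 1)).toNat = (r - l).natAbs + 1 := by omega
    rw [h1]
    apply List.map_congr_left
    intro k _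
    simp

theorem mergeRangeSeqInner_spec (l r L : Int) :
    ∀ (fuel j0 : Nat) (acc : List Int), (0 < L → (acc.length : Int) < L) →
      mergeRangeSeqInner l r L acc j0 fuel =
        if 0 < L ∧ L ≤ ((acc.length + fuel : Nat) : Int) then
          ((acc ++ mergeRangeSeqBody l r j0 fuel).take L.toNat, true)
        else (acc ++ mergeRangeSeqBody l r j0 fuel, false) := by
  intro fuel
  induction fuel with
  | zero =>
    intro j0 acc hlt
    have hnc : ¬ (0 < L ∧ L ≤ ((acc.length + 0 : Nat) : Int)) := by
      rintro ⟨h1, h2⟩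
      have := hlt h1
      push_cast at h2
      omega
    rw [if_neg hnc]
    simp [mergeRangeSeqInner, mergeRangeSeqBody]
  | succ fuel ih =>
    intro j0 acc hlt
    rw [mergeRangeSeqInner]
    set e : Int := if l ≤ r then l + (j0 : Int) else l - (j0 : Int) with he
    by_cases hL : ((acc ++ [e]).length : Int) = L
    · have h1 : (0:Int) < L := by simp at hL; omega
      have hcond : 0 < L ∧ L ≤ ((acc.length + (fuel + 1) : Nat) : Int) := by
        refine ⟨h1, ?_⟩
        simp at hL
        push_cast
        omega
      rw [if_pos hL, if_pos hcond]
      simp only [Prod.mk.injEq, and_true]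
      rw [mergeRangeSeqBody_succ, ← he]
      have hlen : L.toNat = (acc ++ [e]).length := by simp at hL ⊢; omega
      rw [hlen]
      rw [show acc ++ e :: mergeRangeSeqBody l r (j0+1) fuel
            = (acc ++ [e]) ++ mergeRangeSeqBody l r (j0+1) fuel by simp]
      rw [List.take_left]
    · rw [if_neg hL]
      have hlt' : 0 < L → (((acc ++ [e]).length : Int)) < L := by
        intro h1
        have := hlt h1
        simp at hL ⊢
        omega
      rw [ih (j0+1) (acc ++ [e]) hlt']
      have hlen : (acc ++ [e]).length + fuel = acc.length + (fuel + 1) := by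
        simp
        omega
      rw [hlen, mergeRangeSeqBody_succ, ← he]
      simp

theorem mergeRangeSeqOuter_eq_alt (left_seq right_seq : List Int) (L : Int) :
    ∀ (n i : Nat) (acc : List Int), right_seq.length - i ≤ n →
      (0 < L → (acc.length : Int) < L) →
      mergeRangeSeqOuter left_seq right_seq L i acc =
        mergeRangeSeqAltGo left_seq right_seq L i acc := by
  intro n
  induction n with
  | zero =>
    intro i acc hn _
    have h : ¬ i < right_seq.length := by omega
    rw [mergeRangeSeqOuter, mergeRangeSeqAltGo]
    simp [h]
  | succ n ih =>
    intro i acc hn hlt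
    rw [mergeRangeSeqOuter, mergeRangeSeqAltGo]
    by_cases h : i < right_seq.length
    · simp only [dif_pos h]
      set r := right_seq[i] with hr
      set l := PySem.List.pyGetD left_seq (i : Int) 0 with hl
      rw [mergeRangeSeqInner_spec l r L ((r - l).natAbs + 1) 0 acc hlt]
      rw [← mergeRangeSeqSeg_eq_body]
      have hslen : (mergeRangeSeqSeg l r).length = (r - l).natAbs + 1 := by
        rw [mergeRangeSeqSeg_eq_body]
        exact mergeRangeSeqBody_length l r 0 _
      by_cases hc : 0 < L ∧ L ≤ ((acc.length + ((r - l).natAbs + 1) : Nat) : Int)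
      · have hc' : 0 < L ∧ L ≤ ((acc.length + (mergeRangeSeqSeg l r).length : Nat) : Int) := by
          rw [hslen]; exact hc
        rw [if_pos hc, if_pos hc']
        have hacc : (acc.length : Int) < L := hlt hc.1
        have h2 := hc.2
        push_cast at h2
        have htn : L.toNat = acc.length + (L - (acc.length : Int)).toNat := by omega
        rw [htn, List.take_append]
        simp
      · have hc' : ¬ (0 < L ∧ L ≤ ((acc.length + (mergeRangeSeqSeg l r).length : Nat) : Int)) := by
          rw [hslen]; exact hc
        rw [if_neg hc, if_neg hc']
        apply ih
        · omega
        · intro h1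
          rcases not_and_or.mp hc with h2 | h2
          · exact absurd h1 h2
          · simp only [List.length_append, hslen]
            push_cast at h2 ⊢
            omega
    · simp [h]

-- ===== VERDICT (by name: the statement is the Claim_ definition above) =====
theorem mergeRangeSeq_spec : Claim_equal_mergeRangeSeq := by
  intro left_seq right_seq L _ _
  show mergeRangeSeq left_seq right_seq L = mergeRangeSeq_alt left_seq right_seq L
  unfold mergeRangeSeq mergeRangeSeq_alt
  exact mergeRangeSeqOuter_eq_alt left_seq right_seq L right_seq.length 0 []
    (by omega) (by intro h; simpa using h)
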